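-- pv_equiv track=rewrite | github.com/AserAcosta/FROM_Analysis | src/analysis/lexical_analysis.py | analyze_semantic_evolution
-- ===== SOURCE A (Python) =====
-- from collections import defaultdict
--
-- def analyze_semantic_evolution(episode_word_counts):
--     """Analiza la evolución del uso de palabras clave"""
--     evolution = {}
--
--     # Seleccionar palabras clave (las 50 más frecuentes globalmente)
--     global_count = defaultdict(int)
--     for _, word_count in episode_word_counts:
--         for word, count in word_count.items():
--             global_count[word] += count
--
--     top_words = sorted(global_count.items(), key=lambda x: x[1], reverse=True)[:50]
--
--     for word, _ in top_words:
--         word_evolution = []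
--         for episode, word_count in episode_word_counts:
--             frequency = word_count.get(word, 0)
--             word_evolution.append((episode, frequency))
--         evolution[word] = word_evolution
--
--     return evolution
-- ===== SOURCE B (Python) =====
-- from collections import defaultdict
--
-- def analyze_semantic_evolution(episode_word_counts):
--     """Analiza la evolución del uso de palabras clave"""
--     # One fused pass: global totals, an inverted sparse index
--     # word -> [(episode_index, count)] (indices strictly increasing), and the episode names.
--     global_count = defaultdict(int)
--     occurrences = defaultdict(list)
--     episodes = []
--     for i, (episode, word_count) in enumerate(episode_word_counts):
--         episodes.append(episode)
--         for word, count in word_count.items():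
--             global_count[word] += count
--             occurrences[word].append((i, count))
--
--     top_words = sorted(global_count.items(), key=lambda x: x[1], reverse=True)[:50]
--
--     # Materialise each top word's dense series by a two-pointer merge of its sorted
--     # sparse occurrence list against the episode indices; the input dicts are never reread.
--     evolution = {}
--     for word, _ in top_words:
--         occ = occurrences.get(word, [])
--         series = []
--         j = 0
--         for i, episode in enumerate(episodes):
--             if j < len(occ) and occ[j][0] == i:
--                 series.append((episode, occ[j][1]))
--                 j += 1
--             else:
--                 series.append((episode, 0))
--         evolution[word] = series
--     return evolution
-- ===== Notes on version B (the rewrite author's own statement) =====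
-- stated objective: alternative
-- what changed: B builds, in one fused pass, an inverted sparse index word -> [(episode_index, count)] together with the global totals and the episode-name list, and then materialises each top word's dense series by a two-pointer merge of its sparse occurrence list against the episode indices, instead of A's separate counting pass followed by re-reading every episode dict once per top word.
import Mathlib
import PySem

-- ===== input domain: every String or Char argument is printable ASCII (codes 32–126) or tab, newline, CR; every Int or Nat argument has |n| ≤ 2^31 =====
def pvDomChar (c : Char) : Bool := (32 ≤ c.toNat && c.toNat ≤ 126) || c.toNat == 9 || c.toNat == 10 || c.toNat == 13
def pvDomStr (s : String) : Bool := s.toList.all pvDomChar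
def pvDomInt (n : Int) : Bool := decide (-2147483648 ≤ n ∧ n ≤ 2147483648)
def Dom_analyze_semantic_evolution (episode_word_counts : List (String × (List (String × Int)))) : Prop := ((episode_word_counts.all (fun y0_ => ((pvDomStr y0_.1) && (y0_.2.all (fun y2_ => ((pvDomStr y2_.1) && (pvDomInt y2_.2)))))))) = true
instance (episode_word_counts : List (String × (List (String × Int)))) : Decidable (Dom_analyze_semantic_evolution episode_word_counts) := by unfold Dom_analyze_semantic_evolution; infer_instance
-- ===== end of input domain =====

-- B replaces A's two staged passes (count, then re-read every episode dict once per top word)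
-- by one fused pass building an inverted sparse index word -> [(episode_index, count)], and
-- materialises each top word's series by a two-pointer merge of that sparse list against the
-- episode indices. Same cost class ('alternative'); return value only, neither mutates its input.

-- ===== PORT A =====
-- word-outer: for each top word, rebuild its whole series by reading every episode's dict again
def analyze_semantic_evolution (episode_word_counts : List (String × (List (String × Int)))) : List (String × List (String × Int)) :=
  let global_count : PySem.Dict String Int :=
    episode_word_counts.foldl (fun d p =>
      (PySem.Dict.ofList p.2).items.foldl (fun d q => d.modify q.1 0 (fun v => v + q.2)) d)
      PySem.Dict.empty
  let top_words := PySem.List.slice (PySem.List.sorted global_count.items (fun x => x.2) true) none (some 50)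
  let evolution : PySem.Dict String (List (String × Int)) :=
    top_words.foldl (fun ev p =>
      ev.insert p.1
        (episode_word_counts.foldl
          (fun acc eq => acc ++ [(eq.1, (PySem.Dict.ofList eq.2).getD p.1 0)]) []))
      PySem.Dict.empty
  evolution.items

-- ===== PORT B =====
-- the two-pointer merge of Source B's inner loop: the episode stream (enumerate(episodes)) against
-- the word's sparse occurrence list; Python's pointer j becomes the not-yet-consumed suffix occ[j:]
def mergeSeries : List (Int × String) → List (Int × Int) → List (String × Int)
  | [], _ => []
  | (_, ep) :: rest, [] => (ep, 0) :: mergeSeries rest []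
  | (i, ep) :: rest, (oi, oc) :: occ' =>
      if oi == i then (ep, oc) :: mergeSeries rest occ'
      else (ep, 0) :: mergeSeries rest ((oi, oc) :: occ')

-- fused pass (global_count, occurrences, episodes), then merge per top word
def analyze_semantic_evolution_alt (episode_word_counts : List (String × (List (String × Int)))) : List (String × List (String × Int)) :=
  let st :=
    (PySem.List.enumerate episode_word_counts 0).foldl
      (fun st ip =>
        (PySem.Dict.ofList ip.2.2).items.foldl
          (fun st q =>
            (st.1.modify q.1 0 (fun v => v + q.2),
             st.2.1.modify q.1 [] (fun l => l ++ [(ip.1, q.2)]),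
             st.2.2))
          (st.1, st.2.1, st.2.2 ++ [ip.2.1]))
      ((PySem.Dict.empty : PySem.Dict String Int),
       (PySem.Dict.empty : PySem.Dict String (List (Int × Int))),
       ([] : List String))
  let global_count := st.1
  let occurrences := st.2.1
  let episodes := st.2.2
  let top_words := PySem.List.slice (PySem.List.sorted global_count.items (fun x => x.2) true) none (some 50)
  let evolution : PySem.Dict String (List (String × Int)) :=
    top_words.foldl (fun ev p =>
      ev.insert p.1 (mergeSeries (PySem.List.enumerate episodes 0) (occurrences.getD p.1 [])))
      PySem.Dict.empty
  evolution.items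

-- ===== PRECONDITION & SPEC =====
def Spec_analyze_semantic_evolution (episode_word_counts : List (String × (List (String × Int)))) (out : List (String × List (String × Int))) : Prop := out = analyze_semantic_evolution_alt episode_word_counts
instance (episode_word_counts : List (String × (List (String × Int)))) (out : List (String × List (String × Int))) : Decidable (Spec_analyze_semantic_evolution episode_word_counts out) := by unfold Spec_analyze_semantic_evolution; infer_instance

-- ===== CLAIM (what is proved, stated in full; the proofs are below) =====
def Claim_equal_analyze_semantic_evolution : Prop := ∀ (episode_word_counts : List (String × (List (String × Int)))), Dom_analyze_semantic_evolution episode_word_counts → Spec_analyze_semantic_evolution episode_word_counts (analyze_semantic_evolution episode_word_counts)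

-- ===== LEMMAS AND PROOFS =====

-- A's global_count fold, parameterised by the start dict
def pvGcFold (l : List (String × (List (String × Int)))) (gc : PySem.Dict String Int) : PySem.Dict String Int :=
  l.foldl (fun d p =>
    (PySem.Dict.ofList p.2).items.foldl (fun d q => d.modify q.1 0 (fun v => v + q.2)) d) gc

-- B's occurrence-index fold, with explicit running episode index
def pvOccFold : List (String × (List (String × Int))) → Int → PySem.Dict String (List (Int × Int)) → PySem.Dict String (List (Int × Int))
  | [], _, occ => occ
  | p :: rest, s, occ =>
      pvOccFold rest (s + 1)
        ((PySem.Dict.ofList p.2).items.foldl (fun d q => d.modify q.1 [] (fun l => l ++ [(s, q.2)])) occ)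

-- what the index stores for one word: the (index, count) pairs of the episodes containing it
def pvOccSpec (w : String) : List (String × (List (String × Int))) → Int → List (Int × Int)
  | [], _ => []
  | p :: rest, s =>
      (match (PySem.Dict.ofList p.2).get? w with
       | some c => [(s, c)]
       | none => []) ++ pvOccSpec w rest (s + 1)

-- the fused inner loop over one episode's items is three independent loops
theorem pv_inner_split (its : List (String × Int)) (i : Int) :
    ∀ (gc : PySem.Dict String Int) (occ : PySem.Dict String (List (Int × Int))) (eps : List String),
      its.foldl (fun st q =>
          (st.1.modify q.1 0 (fun v => v + q.2),
           st.2.1.modify q.1 [] (fun l => l ++ [(i, q.2)]),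
           st.2.2)) (gc, occ, eps)
        = (its.foldl (fun d q => d.modify q.1 0 (fun v => v + q.2)) gc,
           its.foldl (fun d q => d.modify q.1 [] (fun l => l ++ [(i, q.2)])) occ,
           eps) := by
  induction its with
  | nil => intro gc occ eps; rfl
  | cons q rest ih => intro gc occ eps; exact ih _ _ _

-- B's fused outer pass computes (A's global_count fold, the occurrence fold, the episode names)
theorem pv_fused_split :
    ∀ (l : List (String × (List (String × Int)))) (s : Int)
      (gc : PySem.Dict String Int) (occ : PySem.Dict String (List (Int × Int))) (eps : List String),
      (PySem.List.enumerate l s).foldl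
        (fun st ip =>
          (PySem.Dict.ofList ip.2.2).items.foldl
            (fun st q =>
              (st.1.modify q.1 0 (fun v => v + q.2),
               st.2.1.modify q.1 [] (fun l => l ++ [(ip.1, q.2)]),
               st.2.2))
            (st.1, st.2.1, st.2.2 ++ [ip.2.1]))
        (gc, occ, eps)
      = (pvGcFold l gc, pvOccFold l s occ, eps ++ l.map Prod.fst) := by
  intro l
  induction l with
  | nil => intro s gc occ eps; simp [PySem.List.enumerate_nil, pvGcFold, pvOccFold]
  | cons p rest ih =>
      intro s gc occ eps
      rw [PySem.List.enumerate_cons, List.foldl_cons]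
      show (PySem.List.enumerate rest (s+1)).foldl _
            ((PySem.Dict.ofList p.2).items.foldl _ (gc, occ, eps ++ [p.1])) = _
      rw [pv_inner_split]
      rw [ih]
      simp [pvGcFold, pvOccFold]

-- in a dict with distinct keys, the items with key w are exactly what get? w reports
theorem pv_filter_key (w : String) :
    ∀ (its : List (String × Int)), (its.map Prod.fst).Nodup →
      its.filter (fun q => q.1 == w)
        = (match (PySem.Dict.mk its).get? w with
           | some c => [(w, c)]
           | none => []) := by
  intro its
  induction its with
  | nil => intro _; rfl
  | cons q rest ih =>
      intro h
      rw [List.map_cons, List.nodup_cons] at h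
      rw [List.filter_cons, PySem.Dict.get?_mk_cons]
      by_cases hq : q.1 = w
      · subst hq
        simp only [beq_self_eq_true, if_pos]
        have hrest : rest.filter (fun p => p.1 == q.1) = [] := by
          rw [List.filter_eq_nil_iff]
          intro p hp
          simp only [beq_iff_eq]
          intro hc
          exact h.1 (hc ▸ List.mem_map_of_mem hp)
        simp [hrest]
      · have hb : (q.1 == w) = false := by simp [hq]
        rw [hb]
        simp only [Bool.false_eq_true, if_false]
        exact ih h.2

-- what getD reads back from the occurrence index
theorem pv_occ_getD (w : String) :
    ∀ (l : List (String × (List (String × Int)))) (s : Int) (occ : PySem.Dict String (List (Int × Int))),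
      (pvOccFold l s occ).getD w [] = occ.getD w [] ++ pvOccSpec w l s := by
  intro l
  induction l with
  | nil => intro s occ; simp [pvOccFold, pvOccSpec]
  | cons p rest ih =>
      intro s occ
      rw [pvOccFold, ih]
      have hfold :
          (PySem.Dict.ofList p.2).items.foldl (fun d q => d.modify q.1 [] (fun l => l ++ [(s, q.2)])) occ
            = ((PySem.Dict.ofList p.2).items.map (fun q => (q.1, (s, q.2)))).foldl
                (fun d q => d.modify q.1 [] (fun l => l ++ [q.2])) occ := by
        rw [List.foldl_map]
      rw [hfold, PySem.Dict.getD_foldl_modify_append]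
      have hkeys : (((PySem.Dict.ofList p.2).items.map (fun q => (q.1, (s, q.2)))).filter (fun q => q.1 == w)).map Prod.snd
          = ((PySem.Dict.ofList p.2).items.filter (fun q => q.1 == w)).map (fun q => (s, q.2)) := by
        rw [List.filter_map]
        simp [List.map_map, Function.comp_def]
      rw [hkeys]
      have hnd : ((PySem.Dict.ofList p.2).items.map Prod.fst).Nodup :=
        PySem.Dict.nodup_keys_ofList p.2
      have : (PySem.Dict.mk (PySem.Dict.ofList p.2).items) = PySem.Dict.ofList p.2 := rfl
      rw [pv_filter_key w _ hnd, this, pvOccSpec]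
      cases (PySem.Dict.ofList p.2).get? w with
      | none => simp
      | some c => simp

-- every index stored by pvOccSpec starting at s is ≥ s
theorem pv_occSpec_ge (w : String) :
    ∀ (l : List (String × (List (String × Int)))) (s : Int) (x : Int × Int),
      x ∈ pvOccSpec w l s → s ≤ x.1 := by
  intro l
  induction l with
  | nil => intro s x hx; simp [pvOccSpec] at hx
  | cons p rest ih =>
      intro s x hx
      rw [pvOccSpec, List.mem_append] at hx
      rcases hx with hx | hx
      · cases hg : (PySem.Dict.ofList p.2).get? w with
        | none => rw [hg] at hx; simp at hx
        | some c => rw [hg] at hx; simp at hx; simp [hx]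
      · have := ih (s + 1) x hx
        omega

-- the merge of the sparse list against the episode stream is A's dense series
theorem pv_merge_spec (w : String) :
    ∀ (l : List (String × (List (String × Int)))) (s : Int),
      mergeSeries (PySem.List.enumerate (l.map Prod.fst) s) (pvOccSpec w l s)
        = l.map (fun eq => (eq.1, (PySem.Dict.ofList eq.2).getD w 0)) := by
  intro l
  induction l with
  | nil => intro s; simp [PySem.List.enumerate_nil, pvOccSpec, mergeSeries]
  | cons p rest ih =>
      intro s
      simp only [List.map_cons]
      rw [PySem.List.enumerate_cons, pvOccSpec]
      cases hg : (PySem.Dict.ofList p.2).get? w with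
      | some c =>
          rw [PySem.Dict.getD_of_get?_eq_some _ _ hg]
          simp only [List.singleton_append]
          simp only [mergeSeries, beq_self_eq_true, if_true]
          rw [ih]
      | none =>
          rw [PySem.Dict.getD_of_get?_eq_none _ _ hg, List.nil_append]
          cases hocc : pvOccSpec w rest (s + 1) with
          | nil => rw [mergeSeries, ← hocc, ih]
          | cons x occ' =>
              obtain ⟨xi, xc⟩ := x
              have hx : s + 1 ≤ xi :=
                pv_occSpec_ge w rest (s + 1) (xi, xc) (by rw [hocc]; exact List.mem_cons_self)
              have hne : (xi == s) = false := by simp; omega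
              simp only [mergeSeries, hne, Bool.false_eq_true, if_false]
              rw [← hocc, ih]

-- ported from the previous proof base: keys stay distinct through the counting fold
theorem pv_gc_keys_nodup (ewc : List (String × (List (String × Int)))) :
    ∀ (d : PySem.Dict String Int), d.keys.Nodup → (pvGcFold ewc d).keys.Nodup := by
  induction ewc with
  | nil => intro d hd; exact hd
  | cons p rest ih =>
      intro d hd
      exact ih _ (PySem.Dict.nodup_keys_foldl_modify_key _ Prod.fst 0 (fun _ q v => v + q.2) d hd)

-- the top-50 slice of the sorted items of a dict with distinct keys has distinct words
theorem pv_tw_nodup (d : PySem.Dict String Int) (h : d.keys.Nodup) :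
    ((PySem.List.slice (PySem.List.sorted d.items (fun x => x.2) true) none (some 50)).map Prod.fst).Nodup := by
  have h0 : (d.items.map Prod.fst).Nodup := h
  have h2 : ((PySem.List.sorted d.items (fun x => x.2) true).map Prod.fst).Nodup :=
    (((PySem.List.sorted_perm d.items (fun x => x.2) true).map Prod.fst).nodup_iff).mpr h0
  rw [PySem.List.slice_to _ (by norm_num), List.map_take]
  exact h2.sublist (List.take_sublist _ _)

-- ===== VERDICT (by name: the statement is the Claim_ definition above) =====
theorem analyze_semantic_evolution_spec : Claim_equal_analyze_semantic_evolution := by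
  intro ewc _
  unfold Spec_analyze_semantic_evolution analyze_semantic_evolution analyze_semantic_evolution_alt
  rw [pv_fused_split ewc 0 PySem.Dict.empty PySem.Dict.empty []]
  simp only [List.nil_append]
  have hnd : ((PySem.List.slice (PySem.List.sorted (pvGcFold ewc PySem.Dict.empty).items (fun x => x.2) true) none (some 50)).map Prod.fst).Nodup :=
    pv_tw_nodup _ (pv_gc_keys_nodup ewc PySem.Dict.empty (by simp))
  have hgc : (ewc.foldl (fun d p =>
      (PySem.Dict.ofList p.2).items.foldl (fun d q => d.modify q.1 0 (fun v => v + q.2)) d)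
      PySem.Dict.empty) = pvGcFold ewc PySem.Dict.empty := rfl
  rw [hgc]
  rw [PySem.Dict.items_foldl_insert_fresh _ Prod.fst _ PySem.Dict.empty (by intro a _; simp) hnd,
      PySem.Dict.items_foldl_insert_fresh _ Prod.fst _ PySem.Dict.empty (by intro a _; simp) hnd]
  refine congrArg _ (List.map_congr_left ?_)
  intro p _
  refine congrArg _ ?_
  rw [PySem.List.foldl_append_singleton_eq_map, List.nil_append]
  rw [pv_occ_getD p.1 ewc 0 PySem.Dict.empty]
  simp only [PySem.Dict.getD_empty, List.nil_append]
  exact (pv_merge_spec p.1 ewc 0).symm
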